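-- pv_equiv track=rewrite | github.com/deenaawny-github-account/odootech-second-implementation | price_list_comparison.py | group_products
-- ===== SOURCE A (Python) =====
-- def group_products(data):
--     grouped = []
--     current_group = []
--     for entry in data:
--         if entry[1] == 'MOQ-5k':
--             if current_group:
--                 grouped.append(current_group)
--             current_group = [entry]
--         else:
--             current_group.append(entry)
--     if current_group:
--         grouped.append(current_group)
--     return grouped
-- ===== SOURCE B (Python) =====
-- def group_products(data):
--     out = []
--     i = 0
--     n = len(data)
--     while i < n:
--         j = i + 1
--         while j < n and data[j][1] != 'MOQ-5k':
--             j += 1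
--         out.append(data[i:j])
--         i = j
--     return out
-- ===== Notes on version B (the rewrite author's own statement) =====
-- stated objective: alternative
-- what changed: B replaces A's per-element loop with an accumulator list by a two-level index scan that finds each group's end boundary and emits the whole group as one slice data[i:j].
import Mathlib
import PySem

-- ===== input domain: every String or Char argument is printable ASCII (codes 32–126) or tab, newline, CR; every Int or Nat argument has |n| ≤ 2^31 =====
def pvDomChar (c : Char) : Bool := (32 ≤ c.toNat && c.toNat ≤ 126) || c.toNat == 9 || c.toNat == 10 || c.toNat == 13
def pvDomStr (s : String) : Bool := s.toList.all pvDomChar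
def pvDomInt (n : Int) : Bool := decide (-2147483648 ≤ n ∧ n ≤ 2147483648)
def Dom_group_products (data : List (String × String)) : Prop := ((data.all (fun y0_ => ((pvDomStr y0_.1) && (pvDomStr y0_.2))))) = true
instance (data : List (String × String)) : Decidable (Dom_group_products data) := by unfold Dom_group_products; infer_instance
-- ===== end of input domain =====

-- B scans with a segment-boundary index and emits each group as one slice data[i:j]
-- instead of A's per-element accumulator loop; objective: alternative decomposition, same cost.

-- ===== PORT A =====
-- one fold step = one iteration of A's for-loop over (grouped, current_group)
def gpStep (st : List (List (String × String)) × List (String × String))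
    (entry : String × String) : List (List (String × String)) × List (String × String) :=
  if entry.2 = "MOQ-5k" then
    (if st.2.isEmpty then st.1 else st.1 ++ [st.2], [entry])
  else
    (st.1, st.2 ++ [entry])

def group_products (data : List (String × String)) : List (List (String × String)) :=
  let st := data.foldl gpStep ([], [])
  if st.2.isEmpty then st.1 else st.1 ++ [st.2]

-- ===== PORT B =====
-- the inner while loop: advance j while j < len(data) and data[j][1] != 'MOQ-5k'
def gpFindJ (data : List (String × String)) (j : Nat) : Nat :=
  if j < data.length ∧ (data.getD j ("", "")).2 ≠ "MOQ-5k" then gpFindJ data (j + 1) else j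
termination_by data.length - j
decreasing_by omega

-- termination fact for the outer loop (cited by group_products_alt's decreasing_by)
theorem gpFindJ_ge (data : List (String × String)) (j : Nat) : j ≤ gpFindJ data j := by
  fun_induction gpFindJ data j with
  | case1 j h ih => omega
  | case2 j _ => omega

-- the outer while loop over (out, i)
def gpOuter (data : List (String × String)) (i : Nat)
    (out : List (List (String × String))) : List (List (String × String)) :=
  if i < data.length then
    gpOuter data (gpFindJ data (i + 1))
      (out ++ [PySem.List.slice data (some (i : Int)) (some ((gpFindJ data (i + 1) : Nat) : Int))])
  else out
termination_by data.length - i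
decreasing_by have := gpFindJ_ge data (i + 1); omega

def group_products_alt (data : List (String × String)) : List (List (String × String)) :=
  gpOuter data 0 []

-- ===== PRECONDITION & SPEC =====
def Spec_group_products (data : List (String × String)) (out : List (List (String × String))) : Prop := out = group_products_alt data
instance (data : List (String × String)) (out : List (List (String × String))) : Decidable (Spec_group_products data out) := by unfold Spec_group_products; infer_instance

-- ===== CLAIM (what is proved, stated in full; the proofs are below) =====
def Claim_equal_group_products : Prop := ∀ (data : List (String × String)), Dom_group_products data → Spec_group_products data (group_products data)

-- ===== LEMMAS AND PROOFS =====

-- segment-recursive characterisation of the grouping, used as the bridge between the two ports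
def gpF (c : List (String × String)) : List (String × String) → List (List (String × String))
  | [] => if c.isEmpty then [] else [c]
  | e :: rest =>
    if e.2 = "MOQ-5k" then (if c.isEmpty then [] else [c]) ++ gpF [e] rest
    else gpF (c ++ [e]) rest

theorem gpF_nil_cons (e : String × String) (rest : List (String × String)) :
    gpF [] (e :: rest) = gpF [e] rest := by
  by_cases h : e.2 = "MOQ-5k" <;> simp [gpF, h]

-- A's fold equals gpF
theorem gpA_eq (l : List (String × String)) :
    ∀ g c, (let st := l.foldl gpStep (g, c);
      if st.2.isEmpty then st.1 else st.1 ++ [st.2]) = g ++ gpF c l := by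
  induction l with
  | nil =>
    intro g c
    by_cases h : c.isEmpty <;> simp_all [gpF, List.isEmpty_iff]
  | cons e rest ih =>
    intro g c
    by_cases h : e.2 = "MOQ-5k"
    · by_cases hc : c.isEmpty <;>
        simp_all [gpF, gpStep, List.foldl_cons, List.isEmpty_iff]
    · simp_all [gpF, gpStep, List.foldl_cons]

def gpQ : String × String → Bool := fun e => e.2 != "MOQ-5k"

-- on a nonempty current group, gpF takes one whole segment
theorem gpF_seg (r : List (String × String)) :
    ∀ c, c ≠ [] → gpF c r = (c ++ r.takeWhile gpQ) :: gpF [] (r.dropWhile gpQ) := by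
  induction r with
  | nil => intro c hc; simp [gpF, List.isEmpty_iff, hc]
  | cons e rest ih =>
    intro c hc
    by_cases h : e.2 = "MOQ-5k"
    · have hq : gpQ e = false := by simp [gpQ, h]
      simp [gpF, h, List.isEmpty_iff, hc, hq,
        gpF_nil_cons]
    · have hq : gpQ e = true := by simp [gpQ, h]
      rw [gpF]
      simp only [h, if_false, List.takeWhile_cons, List.dropWhile_cons, hq, if_true]
      rw [ih (c ++ [e]) (by simp)]
      simp
  
-- gpFindJ finds the end of the current no-marker run
theorem gpFindJ_eq (data : List (String × String)) (j : Nat) :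
    gpFindJ data j = j + ((data.drop j).takeWhile gpQ).length := by
  fun_induction gpFindJ data j with
  | case1 j h ih =>
    obtain ⟨hj, hm⟩ := h
    have hd : data.drop j = data[j] :: data.drop (j + 1) :=
      List.drop_eq_getElem_cons hj
    have hget : data.getD j ("", "") = data[j] := List.getD_eq_getElem data _ hj
    have hq : gpQ data[j] = true := by
      simp [gpQ]; rw [hget] at hm; exact hm
    rw [hd, List.takeWhile_cons, hq]
    simp only [if_true, List.length_cons]
    omega
  | case2 j h =>
    by_cases hj : j < data.length
    · have hm : ¬ (data.getD j ("", "")).2 ≠ "MOQ-5k" := by tauto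
      have hget : data.getD j ("", "") = data[j] := List.getD_eq_getElem data _ hj
      have hd : data.drop j = data[j] :: data.drop (j + 1) :=
        List.drop_eq_getElem_cons hj
      have hq : gpQ data[j] = false := by
        simp [gpQ]; rw [hget] at hm; simpa using hm
      rw [hd, List.takeWhile_cons, hq]
      simp
    · have : data.drop j = [] := List.drop_eq_nil_of_le (by omega)
      simp [this]

-- B's outer loop equals gpF on the remaining suffix
theorem gpOuter_eq (data : List (String × String)) (i : Nat)
    (out : List (List (String × String))) :
    gpOuter data i out = out ++ gpF [] (data.drop i) := by
  fun_induction gpOuter data i out with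
  | case2 i out _h =>
    have : data.drop i = [] := List.drop_eq_nil_of_le (by omega)
    simp [this, gpF]
  | case1 i out h ih =>
    rw [ih]
    set t := (data.drop (i + 1)).takeWhile gpQ with ht
    have hj : gpFindJ data (i + 1) = i + 1 + t.length := gpFindJ_eq data (i + 1)
    have hd : data.drop i = data[i] :: data.drop (i + 1) :=
      List.drop_eq_getElem_cons h
    -- the slice data[i:j] is data[i] followed by the no-marker run
    have hpre : data.drop (i + 1) = t ++ (data.drop (i + 1)).dropWhile gpQ := by
      simp [ht]
    have htake : List.take t.length (data.drop (i + 1)) = t := by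
      conv_lhs => rw [hpre]
      exact List.take_left
    have hdropt : List.drop t.length (data.drop (i + 1)) = (data.drop (i + 1)).dropWhile gpQ := by
      conv_lhs => rw [hpre]
      exact List.drop_left
    -- the slice data[i:j] is data[i] followed by the no-marker run
    have hslice : PySem.List.slice data (some (i : Int))
        (some ((gpFindJ data (i + 1) : Nat) : Int)) = data[i] :: t := by
      rw [hj]
      have hc : ((i + 1 + t.length : Nat) : Int) = ((i : Nat) : Int) + ((t.length + 1 : Nat) : Int) := by
        push_cast; ring
      rw [hc, PySem.List.slice_natCast_add, hd, List.take_succ_cons, htake]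
    -- the new position j drops exactly the emitted segment
    have hdropj : data.drop (gpFindJ data (i + 1)) = (data.drop (i + 1)).dropWhile gpQ := by
      rw [hj]
      have hdd : data.drop (i + 1 + t.length) = (data.drop (i + 1)).drop t.length := by
        rw [List.drop_drop]
      rw [hdd, hdropt]
    rw [hslice, hdropj, hd, gpF_nil_cons,
      gpF_seg (List.drop (i + 1) data) [data[i]] (by simp)]
    simp
    exact ht

-- ===== VERDICT (by name: the statement is the Claim_ definition above) =====
theorem group_products_spec : Claim_equal_group_products := by
  intro data _
  unfold Spec_group_products group_products group_products_alt
  rw [gpOuter_eq]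
  simpa using gpA_eq data [] []
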